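-- pv_equiv track=rewrite | github.com/soundwavsg-netizen/M-Supplies | frontend_pricing_logic_test.py | simulate_frontend_pricing_logic
-- ===== SOURCE A (Python) =====
-- def simulate_frontend_pricing_logic(price_tiers, quantity=1):
--     """Simulate how frontend would calculate price based on quantity"""
--     if not price_tiers:
--         return 0
--
--     # Sort price tiers by min_quantity (ascending)
--     sorted_tiers = sorted(price_tiers, key=lambda x: x.get('min_quantity', 0))
--
--     # Find the appropriate tier for the given quantity
--     applicable_tier = sorted_tiers[0]  # Default to first tier
--
--     for tier in sorted_tiers:
--         if quantity >= tier.get('min_quantity', 0):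
--             applicable_tier = tier
--         else:
--             break
--
--     return applicable_tier.get('price', 0)
-- ===== SOURCE B (Python) =====
-- from bisect import bisect_right
--
--
-- def simulate_frontend_pricing_logic(price_tiers, quantity=1):
--     """Binary-search the sorted tier keys instead of scanning them linearly."""
--     if not price_tiers:
--         return 0
--     sorted_tiers = sorted(price_tiers, key=lambda x: x.get('min_quantity', 0))
--     mqs = [t.get('min_quantity', 0) for t in sorted_tiers]
--     idx = bisect_right(mqs, quantity) - 1
--     if idx < 0:
--         idx = 0
--     return sorted_tiers[idx].get('price', 0)
-- ===== Notes on version B (the rewrite author's own statement) =====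
-- stated objective: alternative
-- what changed: A's linear break-on-first-failure scan over the sorted tiers is replaced by bisect_right binary search over the parallel list of min_quantity keys, with the index clamped to 0 below all tiers.
import Mathlib
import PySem

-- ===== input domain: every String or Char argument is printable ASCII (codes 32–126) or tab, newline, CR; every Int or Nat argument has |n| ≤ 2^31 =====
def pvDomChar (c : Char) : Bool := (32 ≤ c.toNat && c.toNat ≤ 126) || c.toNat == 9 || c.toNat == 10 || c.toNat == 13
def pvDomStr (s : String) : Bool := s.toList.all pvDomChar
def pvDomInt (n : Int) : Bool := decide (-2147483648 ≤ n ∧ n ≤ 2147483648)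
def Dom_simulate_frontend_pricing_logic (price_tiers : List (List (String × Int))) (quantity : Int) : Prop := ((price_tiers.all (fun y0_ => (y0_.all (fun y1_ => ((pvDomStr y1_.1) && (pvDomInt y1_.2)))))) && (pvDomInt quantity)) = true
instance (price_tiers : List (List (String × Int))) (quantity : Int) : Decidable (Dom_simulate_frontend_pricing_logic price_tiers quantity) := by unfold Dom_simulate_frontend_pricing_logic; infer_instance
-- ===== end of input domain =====

-- ===== PORT A =====
-- B replaces A's linear scan of the sorted tiers with a bisect_right binary search over the key list (alternative algorithm; return value only).
-- tier.get(k, 0) on a Python dict, modelled through the association list via PySem.Dict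
def pvGet0 (d : List (String × Int)) (k : String) : Int :=
  (PySem.Dict.ofList d).getD k 0

-- the for-loop of A: keep the last tier with min_quantity <= quantity, break at the first failure
def pvLoopA (quantity : Int) : List (List (String × Int)) → List (String × Int) → List (String × Int)
  | [], acc => acc
  | t :: ts, acc => if quantity ≥ pvGet0 t "min_quantity" then pvLoopA quantity ts t else acc

def simulate_frontend_pricing_logic (price_tiers : List (List (String × Int))) (quantity : Int) : Int :=
  -- 'if not price_tiers: return 0'; sorted(price_tiers) is empty iff price_tiers is
  match PySem.List.sorted price_tiers (fun x => pvGet0 x "min_quantity") with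
  | [] => 0
  | a :: rest => pvGet0 (pvLoopA quantity (a :: rest) a) "price"

-- ===== PORT B =====
def simulate_frontend_pricing_logic_alt (price_tiers : List (List (String × Int))) (quantity : Int) : Int :=
  match price_tiers with
  | [] => 0
  | _ :: _ =>
    let sorted_tiers := PySem.List.sorted price_tiers (fun x => pvGet0 x "min_quantity")
    let mqs := sorted_tiers.map (fun t => pvGet0 t "min_quantity")
    let idx : Int := (PySem.List.bisectRight mqs quantity : Int) - 1
    let idx := if idx < 0 then 0 else idx
    pvGet0 (PySem.List.pyGetD sorted_tiers idx []) "price"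

-- ===== PRECONDITION & SPEC =====
def Spec_simulate_frontend_pricing_logic (price_tiers : List (List (String × Int))) (quantity : Int) (out : Int) : Prop := out = simulate_frontend_pricing_logic_alt price_tiers quantity
instance (price_tiers : List (List (String × Int))) (quantity : Int) (out : Int) : Decidable (Spec_simulate_frontend_pricing_logic price_tiers quantity out) := by unfold Spec_simulate_frontend_pricing_logic; infer_instance

-- ===== CLAIM (what is proved, stated in full; the proofs are below) =====
def Claim_equal_simulate_frontend_pricing_logic : Prop := ∀ (price_tiers : List (List (String × Int))) (quantity : Int), Dom_simulate_frontend_pricing_logic price_tiers quantity → Spec_simulate_frontend_pricing_logic price_tiers quantity (simulate_frontend_pricing_logic price_tiers quantity)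

-- ===== LEMMAS AND PROOFS =====

-- A's loop returns the last element of the maximal applicable prefix, or the default
theorem pvLoopA_eq (q : Int) (ts : List (List (String × Int))) (acc : List (String × Int)) :
    pvLoopA q ts acc = (ts.takeWhile (fun t => decide (pvGet0 t "min_quantity" ≤ q))).getLastD acc := by
  induction ts generalizing acc with
  | nil => rfl
  | cons t ts ih =>
    simp only [pvLoopA, List.takeWhile_cons, ge_iff_le]
    by_cases h : pvGet0 t "min_quantity" ≤ q
    · rw [if_pos h, if_pos (by simpa using h), ih]
      cases List.takeWhile (fun t => decide (pvGet0 t "min_quantity" ≤ q)) ts <;> simp [List.getLast?_cons]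
    · simp [h]

-- a prefix characterised by index positions is a take
theorem takeWhile_eq_take_of_index {α : Type} (p : α → Bool) (L : List α) (r : Nat) (hr : r ≤ L.length)
    (h1 : ∀ (j : Nat) (hj : j < L.length), j < r → p L[j])
    (h2 : ∀ (j : Nat) (hj : j < L.length), r ≤ j → ¬ p L[j]) :
    L.takeWhile p = L.take r := by
  induction L generalizing r with
  | nil => simp
  | cons a L ih =>
    cases r with
    | zero =>
      have h0 := h2 0 (by simp) (Nat.zero_le _)
      simp only [List.getElem_cons_zero] at h0
      simp [h0]
    | succ r =>
      have hp := h1 0 (by simp) (Nat.succ_pos _)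
      simp only [List.getElem_cons_zero] at hp
      simp only [List.takeWhile_cons, hp, if_true, List.take_succ_cons]
      rw [ih r (by simpa using hr)
        (fun j hj hjr => by simpa using h1 (j+1) (by simpa using hj) (by omega))
        (fun j hj hjr => by simpa using h2 (j+1) (by simpa using hj) (by omega))]

-- ===== VERDICT (by name: the statement is the Claim_ definition above) =====
theorem simulate_frontend_pricing_logic_spec : Claim_equal_simulate_frontend_pricing_logic := by
  intro pts q _
  unfold Spec_simulate_frontend_pricing_logic simulate_frontend_pricing_logic simulate_frontend_pricing_logic_alt
  cases hpts : pts with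
  | nil => simp [PySem.List.sorted]
  | cons p0 prest =>
    have hne : (p0 :: prest : List (List (String × Int))) ≠ [] := by simp
    cases hst : PySem.List.sorted (p0 :: prest) (fun x => pvGet0 x "min_quantity") with
    | nil => exact absurd ((PySem.List.sorted_eq_nil_iff _ _ _).mp hst) hne
    | cons a rest =>
      show pvGet0 (pvLoopA q (a :: rest) a) "price"
          = pvGet0 (PySem.List.pyGetD (a :: rest)
              (if ((PySem.List.bisectRight (List.map (fun x => pvGet0 x "min_quantity") (a :: rest)) q : Int) - 1) < 0
               then 0
               else ((PySem.List.bisectRight (List.map (fun x => pvGet0 x "min_quantity") (a :: rest)) q : Int) - 1)) []) "price"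
      have hpair : (List.map (fun x => pvGet0 x "min_quantity") (a :: rest)).Pairwise (· ≤ ·) := by
        rw [← hst]; exact PySem.List.sorted_map_key_pairwise _ _
      obtain ⟨hr1, hr2, hr3⟩ := PySem.List.bisectRight_spec _ q hpair
      set mqs := List.map (fun x => pvGet0 x "min_quantity") (a :: rest) with hmqs
      set r := PySem.List.bisectRight mqs q with hrdef
      have hlen : mqs.length = (a :: rest).length := by simp [hmqs]
      have htw : (a :: rest).takeWhile (fun t => decide (pvGet0 t "min_quantity" ≤ q))
          = (a :: rest).take r := by
        apply takeWhile_eq_take_of_index _ _ r (by omega)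
        · intro j hj hjr
          have h := hr2 j (by omega) hjr
          simp only [hmqs, List.getElem_map] at h
          simpa using h
        · intro j hj hjr
          have h := hr3 j (by omega) hjr
          simp only [hmqs, List.getElem_map] at h
          simp only [decide_eq_true_eq, not_le]
          omega
      rw [pvLoopA_eq, htw]
      by_cases hr0 : r = 0
      · rw [hr0]
        norm_num [PySem.List.pyGetD_zero_cons]
      · obtain ⟨k, hk⟩ := Nat.exists_eq_succ_of_ne_zero hr0
        rw [hk]
        have hlt : k < (a :: rest).length := by omega
        rw [if_neg (by push_cast; omega)]
        have hcast : ((k + 1 : Nat) : Int) - 1 = ((k : Nat) : Int) := by push_cast; ring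
        rw [hcast, PySem.List.pyGetD_natCast]
        have hterm : ((a :: rest).take (k + 1)).getLastD a = (a :: rest)[k] := by
          rw [List.getLastD_eq_getLast?, List.getLast?_eq_getElem?]
          have h1 : ((a :: rest).take (k + 1)).length = k + 1 := by
            simp only [List.length_take, List.length_cons]
            simp only [List.length_cons] at hlt
            omega
          rw [h1, Nat.add_sub_cancel, List.getElem?_take, if_pos (Nat.lt_succ_self k),
            List.getElem?_eq_getElem hlt, Option.getD_some]
        rw [hterm]
        simp [List.getD_eq_getElem?_getD, List.getElem?_eq_getElem hlt]
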